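-- pv_equiv track=rewrite | github.com/kieranhj/scr-beeb | bin/bbc.py | pack_4bpp
-- ===== SOURCE A (Python) =====
-- def pack_4bpp(pixels):
--     assert len(pixels)==2,pixels
--     for i in range(2): assert pixels[i]>=0 and pixels[i]<=15
--
--     return ((pixels[0]>>3&1)<<7|
--             (pixels[1]>>3&1)<<6|
--             (pixels[0]>>2&1)<<5|
--             (pixels[1]>>2&1)<<4|
--             (pixels[0]>>1&1)<<3|
--             (pixels[1]>>1&1)<<2|
--             (pixels[0]>>0&1)<<1|
--             (pixels[1]>>0&1)<<0)
-- ===== SOURCE B (Python) =====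
-- def pack_4bpp(pixels):
--     assert len(pixels)==2,pixels
--     for i in range(2): assert pixels[i]>=0 and pixels[i]<=15
--
--     def spread(v):
--         # scatter the four bits of v into bit positions 0,2,4,6 (Morton trick)
--         v = (v | (v << 2)) & 0x33
--         v = (v | (v << 1)) & 0x55
--         return v
--
--     return (spread(pixels[0]) << 1) | spread(pixels[1])
-- ===== Notes on version B (the rewrite author's own statement) =====
-- stated objective: alternative
-- what changed: Replaces the eight per-bit extract/shift/or terms with a word-parallel Morton spread (two mask-and-shift steps per pixel) that scatters each nibble's bits into even positions, then interleaves by one final shift and or.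
import Mathlib
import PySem

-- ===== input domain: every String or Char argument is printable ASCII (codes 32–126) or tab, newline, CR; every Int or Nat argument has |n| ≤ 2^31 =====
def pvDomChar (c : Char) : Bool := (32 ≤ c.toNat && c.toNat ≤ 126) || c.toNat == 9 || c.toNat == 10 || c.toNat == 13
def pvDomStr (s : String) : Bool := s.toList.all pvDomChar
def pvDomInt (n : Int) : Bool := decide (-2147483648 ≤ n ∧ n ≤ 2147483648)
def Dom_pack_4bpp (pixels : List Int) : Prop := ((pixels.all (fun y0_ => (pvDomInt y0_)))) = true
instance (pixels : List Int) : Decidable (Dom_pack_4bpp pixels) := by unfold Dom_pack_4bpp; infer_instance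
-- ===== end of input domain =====

-- ===== PORT A =====
-- B changes the bit-interleave decomposition (Morton spread instead of per-bit terms); same cost.
def pack_4bpp (pixels : List Int) : Int :=
  let p0 := (PySem.List.pyGet? pixels 0).getD 0
  let p1 := (PySem.List.pyGet? pixels 1).getD 0
  PySem.Int.bor ((PySem.Int.band (p0 >>> (3:Nat)) 1) <<< (7:Nat)) (
  PySem.Int.bor ((PySem.Int.band (p1 >>> (3:Nat)) 1) <<< (6:Nat)) (
  PySem.Int.bor ((PySem.Int.band (p0 >>> (2:Nat)) 1) <<< (5:Nat)) (
  PySem.Int.bor ((PySem.Int.band (p1 >>> (2:Nat)) 1) <<< (4:Nat)) (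
  PySem.Int.bor ((PySem.Int.band (p0 >>> (1:Nat)) 1) <<< (3:Nat)) (
  PySem.Int.bor ((PySem.Int.band (p1 >>> (1:Nat)) 1) <<< (2:Nat)) (
  PySem.Int.bor ((PySem.Int.band (p0 >>> (0:Nat)) 1) <<< (1:Nat))
                ((PySem.Int.band (p1 >>> (0:Nat)) 1) <<< (0:Nat))))))))

-- ===== PORT B =====
-- Morton spread: scatter the four low bits of v into bit positions 0,2,4,6.
def pvSpread (v : Int) : Int :=
  let v := PySem.Int.band (PySem.Int.bor v (v <<< (2:Nat))) 0x33
  PySem.Int.band (PySem.Int.bor v (v <<< (1:Nat))) 0x55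

def pack_4bpp_alt (pixels : List Int) : Int :=
  let p0 := (PySem.List.pyGet? pixels 0).getD 0
  let p1 := (PySem.List.pyGet? pixels 1).getD 0
  PySem.Int.bor (pvSpread p0 <<< (1:Nat)) (pvSpread p1)

-- ===== PRECONDITION & SPEC =====
-- Pre_ excludes exactly the inputs on which A's asserts raise: length ≠ 2 or a pixel outside 0..15.
def Pre_pack_4bpp (pixels : List Int) : Prop :=
  pixels.length = 2 ∧ ∀ p ∈ pixels, 0 ≤ p ∧ p ≤ 15
instance (pixels : List Int) : Decidable (Pre_pack_4bpp pixels) := by unfold Pre_pack_4bpp; infer_instance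
def pvWitness_pack_4bpp : List Int := [13, 6]

def Spec_pack_4bpp (pixels : List Int) (out : Int) : Prop := out = pack_4bpp_alt pixels
instance (pixels : List Int) (out : Int) : Decidable (Spec_pack_4bpp pixels out) := by unfold Spec_pack_4bpp; infer_instance

-- ===== CLAIM (what is proved, stated in full; the proofs are below) =====
def Claim_equal_pack_4bpp : Prop := ∀ (pixels : List Int), Dom_pack_4bpp pixels → Pre_pack_4bpp pixels → Spec_pack_4bpp pixels (pack_4bpp pixels)

-- ===== LEMMAS AND PROOFS =====
lemma pack_pair_eq (a b : Int) (ha0 : 0 ≤ a) (ha1 : a ≤ 15) (hb0 : 0 ≤ b) (hb1 : b ≤ 15) :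
    pack_4bpp [a, b] = pack_4bpp_alt [a, b] := by
  interval_cases a <;> interval_cases b <;> decide

-- ===== VERDICT (by name: the statement is the Claim_ definition above) =====
theorem pack_4bpp_spec : Claim_equal_pack_4bpp := by
  intro pixels _ hpre
  obtain ⟨hlen, hrng⟩ := hpre
  match pixels, hlen with
  | [a, b], _ =>
    have ha := hrng a (by simp)
    have hb := hrng b (by simp)
    exact pack_pair_eq a b ha.1 ha.2 hb.1 hb.2
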